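-- pv_equiv track=rewrite | github.com/mlin567/SI507_FinalProject | Networks.py | get_family
-- ===== SOURCE A (Python) =====
-- def get_family(character):
--     family_groups = {
--         "Pritchett": ["Jay", "Gloria", "Manny", "Joe"],
--         "Dunphy": ["Claire", "Phil", "Haley", "Alex", "Luke"],
--         "Tucker-Pritchett": ["Mitchell", "Cameron", "Lily"]
--     }
--     for family, members in family_groups.items():
--         if character in members:
--             return family
--     return "Unknown"
-- ===== SOURCE B (Python) =====
-- def get_family(character):
--     # Flat roster in family order; classify by the position where the name occurs.
--     members = ["Jay", "Gloria", "Manny", "Joe",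
--                "Claire", "Phil", "Haley", "Alex", "Luke",
--                "Mitchell", "Cameron", "Lily"]
--     try:
--         i = members.index(character)
--     except ValueError:
--         return "Unknown"
--     return "Pritchett" if i < 4 else ("Dunphy" if i < 9 else "Tucker-Pritchett")
-- ===== Notes on version B (the rewrite author's own statement) =====
-- stated objective: alternative
-- what changed: Replaces the dict of per-family member lists and its membership loop with a single flat roster list in family order: one index() search, then the position is mapped to the family name by numeric thresholds (4 and 9).
import Mathlib
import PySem

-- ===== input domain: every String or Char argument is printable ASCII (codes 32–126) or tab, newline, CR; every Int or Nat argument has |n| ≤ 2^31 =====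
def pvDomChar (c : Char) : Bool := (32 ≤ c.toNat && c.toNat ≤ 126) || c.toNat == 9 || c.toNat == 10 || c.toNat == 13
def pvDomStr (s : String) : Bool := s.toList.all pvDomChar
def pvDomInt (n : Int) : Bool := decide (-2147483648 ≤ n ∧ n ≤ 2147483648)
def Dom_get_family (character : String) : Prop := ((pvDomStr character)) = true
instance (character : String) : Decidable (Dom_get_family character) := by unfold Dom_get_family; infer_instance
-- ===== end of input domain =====

-- B replaces A's dict-of-lists membership loop with one flat roster list: a single index() search whose position is mapped to the family by numeric thresholds (objective: alternative).


-- ===== PORT A =====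
-- the module-level family table of A
def pvFamilyGroups : PySem.Dict String (List String) :=
  PySem.Dict.ofList
    [("Pritchett", ["Jay", "Gloria", "Manny", "Joe"]),
     ("Dunphy", ["Claire", "Phil", "Haley", "Alex", "Luke"]),
     ("Tucker-Pritchett", ["Mitchell", "Cameron", "Lily"])]

-- A: loop over (family, members) items, return family on first membership hit
def pvFamLoop (character : String) : List (String × List String) → String
  | [] => "Unknown"
  | (family, members) :: rest =>
      if members.contains character then family else pvFamLoop character rest

def get_family (character : String) : String :=
  pvFamLoop character pvFamilyGroups.items

-- ===== PORT B =====
-- B: flat roster; members.index(character) (try/except ValueError → index? none), threshold mapping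
def pvRoster : List String :=
  ["Jay", "Gloria", "Manny", "Joe",
   "Claire", "Phil", "Haley", "Alex", "Luke",
   "Mitchell", "Cameron", "Lily"]

def get_family_alt (character : String) : String :=
  match PySem.List.index? pvRoster character with
  | none => "Unknown"
  | some i => if i < 4 then "Pritchett" else if i < 9 then "Dunphy" else "Tucker-Pritchett"

-- ===== PRECONDITION & SPEC =====
def Spec_get_family (character : String) (out : String) : Prop := out = get_family_alt character
instance (character : String) (out : String) : Decidable (Spec_get_family character out) := by unfold Spec_get_family; infer_instance

-- ===== CLAIM (what is proved, stated in full; the proofs are below) =====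
def Claim_equal_get_family : Prop := ∀ (character : String), Dom_get_family character → Spec_get_family character (get_family character)

-- ===== LEMMAS AND PROOFS =====
theorem get_family_eta (c : String) :
    get_family c =
      (if c = "Jay" ∨ c = "Gloria" ∨ c = "Manny" ∨ c = "Joe" then "Pritchett"
       else if c = "Claire" ∨ c = "Phil" ∨ c = "Haley" ∨ c = "Alex" ∨ c = "Luke" then "Dunphy"
       else if c = "Mitchell" ∨ c = "Cameron" ∨ c = "Lily" then "Tucker-Pritchett"
       else "Unknown") := by
  have h : pvFamilyGroups.items =
      [("Pritchett", ["Jay", "Gloria", "Manny", "Joe"]),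
       ("Dunphy", ["Claire", "Phil", "Haley", "Alex", "Luke"]),
       ("Tucker-Pritchett", ["Mitchell", "Cameron", "Lily"])] := by decide
  simp [get_family, h, pvFamLoop]

theorem get_family_alt_eta (c : String) :
    get_family_alt c =
      (if c = "Jay" ∨ c = "Gloria" ∨ c = "Manny" ∨ c = "Joe" then "Pritchett"
       else if c = "Claire" ∨ c = "Phil" ∨ c = "Haley" ∨ c = "Alex" ∨ c = "Luke" then "Dunphy"
       else if c = "Mitchell" ∨ c = "Cameron" ∨ c = "Lily" then "Tucker-Pritchett"
       else "Unknown") := by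
  by_cases hm : c ∈ pvRoster
  · simp only [pvRoster, List.mem_cons, List.not_mem_nil, or_false] at hm
    rcases hm with h|h|h|h|h|h|h|h|h|h|h|h <;> subst h <;> decide
  · have hnone : List.idxOf? c pvRoster = none := List.idxOf?_eq_none_iff.mpr hm
    simp only [pvRoster, List.mem_cons, List.not_mem_nil, or_false, not_or] at hm
    obtain ⟨h1, h2, h3, h4, h5, h6, h7, h8, h9, h10, h11, h12⟩ := hm
    simp [get_family_alt, PySem.List.index?_eq_idxOf?, hnone,
          h1, h2, h3, h4, h5, h6, h7, h8, h9, h10, h11, h12]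

-- ===== VERDICT (by name: the statement is the Claim_ definition above) =====
theorem get_family_spec : Claim_equal_get_family := by
  intro c _
  unfold Spec_get_family
  rw [get_family_eta, get_family_alt_eta]
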